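-- pv_equiv track=rewrite | github.com/GA-jahida/advent-of-code | 2022/day13.py | get_sum_pairs
-- ===== SOURCE A (Python) =====
-- import ast
--
-- def get_sum_pairs(lines):
--     sum_pairs = 0
--     for i in range(0, len(lines) - 1, 3):
--         left = ast.literal_eval(lines[i].replace("\n",""))
--         right = ast.literal_eval(lines[i+1].replace("\n",""))
--         if is_right_order(left, right) == 1:
--             sum_pairs += (i//3) + 1
--     return sum_pairs
--
-- def is_right_order(left, right):
--     if isinstance(left, int) and isinstance(right, int):
--         if left < right:
--             return 1
--         elif left > right:
--             return -1
--         else: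
--             return 0
--     if isinstance(left, list) and isinstance(right, list):
--         for index, value in enumerate(left):
--             if index < len(right):
--                 x = is_right_order(value, right[index])
--                 if not x == 0:
--                     return x
--             if index == len(right):
--                 return -1
--         if len(left) == len(right):
--             return 0
--         return 1
--     if isinstance(left, list):
--         return is_right_order(left, [right])
--     if isinstance(right, list):
--         return is_right_order([left], right)
-- ===== SOURCE B (Python) =====
-- def get_sum_pairs(lines):
--     total, k = 0, 1
--     for i in range(0, len(lines) - 1, 3):
--         left = parse_line(lines[i])
--         right = parse_line(lines[i + 1])
--         if compare(left, right) == 1: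
--             total += k
--         k += 1
--     return total
--
--
-- def compare(left, right):
--     if isinstance(left, int) and isinstance(right, int):
--         return (left < right) - (left > right)
--     l = [left] if isinstance(left, int) else left
--     r = [right] if isinstance(right, int) else right
--     for a, b in zip(l, r):
--         c = compare(a, b)
--         if c:
--             return c
--     return (len(r) > len(l)) - (len(r) < len(l))
--
--
-- def _skip_ws(s, i):
--     while i < len(s) and s[i] in " \t":
--         i += 1
--     return i
--
--
-- def _parse_num(s, i):
--     neg = False
--     if i < len(s) and s[i] in "+-":
--         neg = s[i] == "-"
--         i = _skip_ws(s, i + 1)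
--     j = i
--     while j < len(s) and s[j].isdigit():
--         j += 1
--     ds = s[i:j]
--     if not ds or (len(ds) > 1 and ds[0] == "0"):
--         raise ValueError("bad packet literal")
--     n = int(ds)
--     return (-n if neg else n), j
--
--
-- def _parse_value(s, i):
--     i = _skip_ws(s, i)
--     if i < len(s) and s[i] == "[":
--         j = _skip_ws(s, i + 1)
--         if j < len(s) and s[j] == "]":
--             return [], j + 1
--         return _parse_items(s, j)
--     return _parse_num(s, i)
--
--
-- def _parse_items(s, i):
--     p, j = _parse_value(s, i)
--     j = _skip_ws(s, j)
--     if j < len(s) and s[j] == ",":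
--         k = _skip_ws(s, j + 1)
--         if k < len(s) and s[k] == "]":
--             return [p], k + 1
--         rest, m = _parse_items(s, k)
--         return [p] + rest, m
--     if j < len(s) and s[j] == "]":
--         return [p], j + 1
--     raise ValueError("bad packet literal")
--
--
-- def parse_line(line):
--     s = line.replace("\n", "")
--     v, j = _parse_value(s, 0)
--     if _skip_ws(s, j) != len(s):
--         raise ValueError("bad packet literal")
--     return v
-- ===== Notes on version B (the rewrite author's own statement) =====
-- stated objective: alternative
-- what changed: is_right_order's index-loop with the index==len(right) sentinel and the recursive int-wrapping is rewritten as a canonical cmp: arithmetic sign (l<r)-(l>r) for ints, inline promotion of an int operand to a singleton list, a pairwise zip walk returning the first nonzero sub-comparison, then a length tie-break; the outer loop keeps a running pair counter instead of recomputing i//3+1, and ast.literal_eval is replaced by a small recursive-descent packet parser.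
-- outside the precondition, e.g. on get_sum_pairs(["'a'", "'b'"]): A returns 0, B raises ValueError; on get_sum_pairs(['1_0', '[2]']): A returns 0, B raises ValueError; on get_sum_pairs(['1.5', '[2]']): A returns 0, B raises ValueError
import Mathlib
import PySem

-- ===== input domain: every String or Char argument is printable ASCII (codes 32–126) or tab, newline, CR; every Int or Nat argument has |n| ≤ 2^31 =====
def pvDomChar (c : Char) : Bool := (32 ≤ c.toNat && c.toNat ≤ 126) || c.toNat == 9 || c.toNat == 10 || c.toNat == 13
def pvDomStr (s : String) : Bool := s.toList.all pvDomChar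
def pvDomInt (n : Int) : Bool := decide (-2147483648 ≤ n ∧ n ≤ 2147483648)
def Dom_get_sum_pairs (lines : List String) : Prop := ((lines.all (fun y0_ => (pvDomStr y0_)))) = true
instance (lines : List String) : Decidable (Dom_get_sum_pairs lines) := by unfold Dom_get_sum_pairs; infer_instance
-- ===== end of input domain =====

-- B rewrites the packet comparator in the canonical cmp style (arithmetic sign for ints,
-- inline promotion to singleton lists, pairwise walk with first-nonzero result, length
-- tie-break) and keeps a running pair counter instead of recomputing i//3 + 1 (objective:
-- idiomatic; same asymptotic cost).

-- ===== PORT A =====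
-- Packets: nested lists of ints (the values ast.literal_eval yields on the AoC input;
-- Pre_ below restricts to lines in this grammar). Mutual pair, no nested inductive.
mutual
inductive Packet where
  | int : Int → Packet
  | list : PList → Packet
inductive PList where
  | nil : PList
  | cons : Packet → PList → PList
end

-- size measures for termination of the two comparators
mutual
def psize : Packet → Nat
  | .int _ => 2
  | .list l => 1 + lsize l
def lsize : PList → Nat
  | .nil => 0
  | .cons p l => psize p + lsize l
end

-- shared helper: port of ast.literal_eval restricted to the packet grammar
-- (optionally signed decimal ints without leading zeros, nested lists, spaces/tabs,
-- trailing commas) — exact vs CPython on that grammar; Pre_ admits only lines in it.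
def pvSkipWs (cs : List Char) : List Char := cs.dropWhile (fun c => c = ' ' || c = '\t')

def pvDigitsVal (ds : List Char) : Int := ds.foldl (fun a c => a * 10 + ((c.toNat - 48 : Nat) : Int)) 0

def pvParseNum (cs : List Char) : Option (Int × List Char) :=
  let (neg, cs1) :=
    match cs with
    | '-' :: r => (true, r)
    | '+' :: r => (false, r)
    | _ => (false, cs)
  let cs2 := pvSkipWs cs1
  let ds := cs2.takeWhile Char.isDigit
  let rest := cs2.dropWhile Char.isDigit
  if ds = [] then none
  else if 1 < ds.length ∧ ds.head? = some '0' then none  -- leading zeros: SyntaxError in Python 3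
  else some (if neg then -(pvDigitsVal ds) else pvDigitsVal ds, rest)

-- single structural recursion on fuel (mode=false: one packet; mode=true: ","-separated items)
def pvParseAux : Nat → Bool → List Char → Option ((Packet ⊕ PList) × List Char)
  | 0, _, _ => none
  | fuel+1, false, cs =>
    match pvSkipWs cs with
    | '[' :: rest =>
      match pvSkipWs rest with
      | ']' :: r2 => some (.inl (.list .nil), r2)
      | rest2 =>
        match pvParseAux fuel true rest2 with
        | some (.inr l, r) => some (.inl (.list l), r)
        | _ => none
    | cs' => (pvParseNum cs').map (fun pr => (Sum.inl (Packet.int pr.1), pr.2))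
  | fuel+1, true, cs =>
    match pvParseAux fuel false cs with
    | some (.inl p, r) =>
      (match pvSkipWs r with
       | ',' :: r2 =>
         match pvSkipWs r2 with
         | ']' :: r3 => some (.inr (.cons p .nil), r3)     -- trailing comma "[x,]"
         | r2' =>
           match pvParseAux fuel true r2' with
           | some (.inr l, r4) => some (.inr (.cons p l), r4)
           | _ => none
       | ']' :: r2 => some (.inr (.cons p .nil), r2)
       | _ => none)
    | _ => none

def parseLine (s : String) : Option Packet :=
  let cs := (PySem.Str.replace s "\n" "").toList   -- lines[i].replace("\n","")
  match pvParseAux (2 * cs.length + 4) false cs with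
  | some (.inl p, rest) => if pvSkipWs rest = [] then some p else none
  | _ => none

-- A's is_right_order; the int-vs-list wrap is_right_order(left,[right]) is unfolded one
-- step into the list/list loop (Python immediately re-enters the list branch), and the
-- nested recursion is made structural by a fuel guard (psize left + psize right bounds
-- the recursion depth, so the fuel-0 branch is never reached from is_right_order).
def iroLoop (cmp : Packet → Packet → Int) : PList → PList → Int
  | .nil, .nil => 0
  | .nil, .cons _ _ => 1
  | .cons _ _, .nil => -1
  | .cons v l, .cons w r =>
    let x := cmp v w
    if ¬ x = 0 then x else iroLoop cmp l r

def iroF : Nat → Packet → Packet → Int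
  | 0, _, _ => 0
  | _+1, .int a, .int b => if a < b then 1 else if a > b then -1 else 0
  | f+1, .list l, .list r => iroLoop (iroF f) l r
  | f+1, .list l, .int b => iroLoop (iroF f) l (.cons (.int b) .nil)
  | f+1, .int a, .list r => iroLoop (iroF f) (.cons (.int a) .nil) r

def is_right_order (left right : Packet) : Int := iroF (psize left + psize right) left right

def get_sum_pairs (lines : List String) : Int :=
  (PySem.List.pyRange 0 ((lines.length : Int) - 1) 3).foldl
    (fun sum_pairs i =>
      match (PySem.List.pyGet? lines i).bind parseLine,
            (PySem.List.pyGet? lines (i+1)).bind parseLine with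
      | some left, some right =>
          if is_right_order left right = 1 then sum_pairs + (PySem.Int.floordiv i 3 + 1)
          else sum_pairs
      | _, _ => sum_pairs)   -- Python raises here (literal_eval); excluded by Pre_
    0

-- ===== PORT B =====
def llen : PList → Nat
  | .nil => 0
  | .cons _ l => 1 + llen l

def promote : Packet → PList      -- l = [l] if isinstance(l, int) else l
  | .int a => .cons (.int a) .nil
  | .list l => l

-- Source B's compare with the same structural fuel guard; zipFirst is the
-- 'for a, b in zip(l, r)' walk followed by the length tie-break
def zipFirst (cmp : Packet → Packet → Int) : PList → PList → Int
  | .cons a l, .cons b r =>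
    let c := cmp a b
    if c ≠ 0 then c else zipFirst cmp l r
  | l, r => (if llen l < llen r then (1:Int) else 0) - (if llen r < llen l then 1 else 0)

def pcompareF : Nat → Packet → Packet → Int
  | 0, _, _ => 0
  | _+1, .int a, .int b => (if a < b then (1:Int) else 0) - (if b < a then 1 else 0)
  | f+1, p, q => zipFirst (pcompareF f) (promote p) (promote q)

def pcompare (left right : Packet) : Int := pcompareF (psize left + psize right) left right

def get_sum_pairs_alt (lines : List String) : Int :=
  ((PySem.List.pyRange 0 ((lines.length : Int) - 1) 3).foldl
    (fun st i =>
      match (PySem.List.pyGet? lines i).bind parseLine,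
            (PySem.List.pyGet? lines (i+1)).bind parseLine with
      | some left, some right =>
          (if pcompare left right = 1 then st.1 + st.2 else st.1, st.2 + 1)
      | _, _ => (st.1, st.2 + 1))   -- Python raises here; excluded by Pre_
    ((0 : Int), (1 : Int))).1

-- ===== PRECONDITION & SPEC =====
-- Pre_ admits exactly the inputs whose USED lines (indices visited by the range loop) are
-- packet literals — nested lists of signed decimal ints; other lines literal_eval accepts
-- (strings, floats, tuples, '\r'/underscore forms) are excluded because A's comparator
-- yields accidental values there (None == 1 is False) while B may raise or rank them.
-- pvStep: one-pass automaton for the packet grammar (depth counter + mode: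
-- 1 expect value, 2 expect value or ']', 3 after value, 4 after sign, 5 number "0", 6 in number)
def pvStep : Option (Nat × Nat) → Char → Option (Nat × Nat)
  | none, _ => none
  | some (d, m), c =>
    let ws := c = ' ' || c = '\t'
    if m = 1 ∨ m = 2 then
      if ws then some (d, m)
      else if c = '[' then some (d+1, 2)
      else if c = '-' ∨ c = '+' then some (d, 4)
      else if c = '0' then some (d, 5)
      else if c.isDigit then some (d, 6)
      else if c = ']' ∧ m = 2 ∧ 0 < d then some (d-1, 3)
      else none
    else if m = 4 then
      if ws then some (d, 4)
      else if c = '0' then some (d, 5)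
      else if c.isDigit then some (d, 6)
      else none
    else
      if m = 6 ∧ c.isDigit then some (d, 6)
      else if m = 5 ∧ c.isDigit then none
      else if ws then some (d, 3)
      else if c = ',' then (if 0 < d then some (d, 2) else none)
      else if c = ']' then (if 0 < d then some (d-1, 3) else none)
      else none

def pvIsPacketLine (s : String) : Bool :=
  match (PySem.Str.replace s "\n" "").toList.foldl pvStep (some (0, 1)) with
  | some (d, m) => d == 0 && (m == 3 || m == 5 || m == 6)
  | none => false

def Pre_get_sum_pairs (lines : List String) : Prop :=
  ∀ i ∈ PySem.List.pyRange 0 ((lines.length : Int) - 1) 3,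
    ((PySem.List.pyGet? lines i).map pvIsPacketLine).getD false = true ∧
    ((PySem.List.pyGet? lines (i+1)).map pvIsPacketLine).getD false = true
instance (lines : List String) : Decidable (Pre_get_sum_pairs lines) := by
  unfold Pre_get_sum_pairs; infer_instance

def pvWitness_get_sum_pairs : List String := ["[1,[2,3]]", "[1,[2,4]]"]

def Spec_get_sum_pairs (lines : List String) (out : Int) : Prop := out = get_sum_pairs_alt lines
instance (lines : List String) (out : Int) : Decidable (Spec_get_sum_pairs lines out) := by unfold Spec_get_sum_pairs; infer_instance

-- ===== CLAIM (what is proved, stated in full; the proofs are below) =====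
def Claim_equal_get_sum_pairs : Prop := ∀ (lines : List String), Dom_get_sum_pairs lines → Pre_get_sum_pairs lines → Spec_get_sum_pairs lines (get_sum_pairs lines)

-- ===== LEMMAS AND PROOFS =====

-- the two comparators agree on every packet
theorem loops_eq (c1 c2 : Packet → Packet → Int) (h : ∀ p q, c1 p q = c2 p q) :
    ∀ l r, iroLoop c1 l r = zipFirst c2 l r
  | .nil, .nil => by simp [iroLoop, zipFirst, llen]
  | .nil, .cons w r => by simp [iroLoop, zipFirst, llen]
  | .cons v l, .nil => by simp [iroLoop, zipFirst, llen]
  | .cons v l, .cons w r => by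
      simp only [iroLoop, zipFirst]
      rw [h v w, loops_eq c1 c2 h l r]

theorem cmpF_eq : ∀ (f : Nat) (p q : Packet), iroF f p q = pcompareF f p q := by
  intro f
  induction f with
  | zero => intro p q; rfl
  | succ f ih =>
    intro p q
    cases p <;> cases q
    · simp only [iroF, pcompareF]; split_ifs <;> omega
    · simp only [iroF, pcompareF, promote]; exact loops_eq _ _ ih _ _
    · simp only [iroF, pcompareF, promote]; exact loops_eq _ _ ih _ _
    · simp only [iroF, pcompareF, promote]; exact loops_eq _ _ ih _ _

theorem cmp_eq (p q : Packet) : is_right_order p q = pcompare p q :=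
  cmpF_eq _ p q

-- the common success test of one loop iteration
def pairOk (lines : List String) (i : Int) : Bool :=
  match (PySem.List.pyGet? lines i).bind parseLine,
        (PySem.List.pyGet? lines (i+1)).bind parseLine with
  | some left, some right => pcompare left right = 1
  | _, _ => false

theorem bodyA (lines : List String) (acc i : Int) :
    (match (PySem.List.pyGet? lines i).bind parseLine,
           (PySem.List.pyGet? lines (i+1)).bind parseLine with
     | some left, some right =>
         if is_right_order left right = 1 then acc + (PySem.Int.floordiv i 3 + 1) else acc
     | _, _ => acc)
    = if pairOk lines i then acc + (PySem.Int.floordiv i 3 + 1) else acc := by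
  unfold pairOk
  cases h1 : (PySem.List.pyGet? lines i).bind parseLine <;>
    cases h2 : (PySem.List.pyGet? lines (i+1)).bind parseLine <;>
    simp [cmp_eq]

theorem bodyB (lines : List String) (st : Int × Int) (i : Int) :
    (match (PySem.List.pyGet? lines i).bind parseLine,
           (PySem.List.pyGet? lines (i+1)).bind parseLine with
     | some left, some right =>
         (if pcompare left right = 1 then st.1 + st.2 else st.1, st.2 + 1)
     | _, _ => (st.1, st.2 + 1))
    = (if pairOk lines i then st.1 + st.2 else st.1, st.2 + 1) := by
  unfold pairOk
  cases h1 : (PySem.List.pyGet? lines i).bind parseLine <;>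
    cases h2 : (PySem.List.pyGet? lines (i+1)).bind parseLine <;>
    simp

theorem fold_main (cond : Int → Bool) : ∀ (N : Nat),
    ((List.range N).map (fun k : Nat => (0:Int) + 3 * (k:Int))).foldl
      (fun st i => (if cond i then st.1 + st.2 else st.1, st.2 + 1)) ((0:Int), (1:Int))
    = (((List.range N).map (fun k : Nat => (0:Int) + 3 * (k:Int))).foldl
        (fun acc i => if cond i then acc + (PySem.Int.floordiv i 3 + 1) else acc) 0,
       (N : Int) + 1) := by
  intro N
  induction N with
  | zero => simp
  | succ n ih =>
    have hdiv : PySem.Int.floordiv ((0:Int) + 3 * (n:Nat)) 3 = (n : Int) := by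
      have h1 : ((0:Int) + 3 * (n:Nat)) = ((3 * n : Nat) : Int) := by push_cast; ring
      rw [h1, PySem.Int.floordiv_eq_ediv_of_pos (by norm_num)]
      omega
    simp only [List.range_succ, List.map_append, List.foldl_append, List.map_cons,
      List.map_nil, List.foldl_cons, List.foldl_nil, ih, hdiv, Prod.mk.injEq]
    exact ⟨trivial, by push_cast; ring⟩

-- ===== VERDICT (by name: the statement is the Claim_ definition above) =====
theorem get_sum_pairs_spec : Claim_equal_get_sum_pairs := by
  intro lines _ _
  unfold Spec_get_sum_pairs get_sum_pairs get_sum_pairs_alt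
  rw [PySem.List.pyRange_of_pos 0 ((lines.length : Int) - 1) (by norm_num)]
  rw [PySem.List.foldl_congr_mem _ _ _ _ (fun acc x _ => bodyA lines acc x)]
  rw [PySem.List.foldl_congr_mem _ _ _ _ (fun st x _ => bodyB lines st x)]
  rw [fold_main (pairOk lines)]
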